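-- pv_equiv track=rewrite | github.com/skkimeo/get-ready-with-me | lv.2: 메뉴 리뉴얼.py | solution
-- ===== SOURCE A (Python) =====
-- from itertools import combinations
-- from collections import Counter
--
-- def make_new_course_if_possible(candidates):
--     courses = []
--
--     if not candidates:
--         return courses
--
--     candidates = candidates.most_common()
--     max_popularity = candidates[0][1]
--     for combo, popularity in candidates:
--         if popularity > 1 and popularity == max_popularity:
--             courses.append(combo)
--         else:
--             break
--
--     return courses
--
-- def solution(orders, course):
--     courses = []
--
--     # 스카피가 원하는 메뉴 개수마다 후보 모두 확인
--     for number in course: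
--         candidates = Counter()
--         for order in orders:
--             combos = ["".join(char for char in sorted(combo)) for combo in combinations(order, number)]
--             candidates += Counter(combos)
--
--         courses += make_new_course_if_possible(candidates)
--
--     return sorted(courses)
-- ===== SOURCE B (Python) =====
-- from itertools import combinations
--
-- def solution(orders, course):
--     # Sort-and-scan instead of hash counting: for each size, flatten all combos into
--     # one sorted list and find the most frequent combos by scanning runs of equal
--     # neighbours, tracking the best run length and its winners on the fly.
--     result = []
--     for n in course:
--         combos = sorted("".join(sorted(c)) for o in orders for c in combinations(o, n))
--         best = 0
--         winners = []
--         i = 0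
--         while i < len(combos):
--             j = i
--             while j < len(combos) and combos[j] == combos[i]:
--                 j += 1
--             run = j - i
--             if run > 1:
--                 if run > best:
--                     best = run
--                     winners = [combos[i]]
--                 elif run == best:
--                     winners.append(combos[i])
--             i = j
--         result += winners
--     return sorted(result)
-- ===== Notes on version B (the rewrite author's own statement) =====
-- stated objective: faster
-- what changed: B drops the Counter/most_common machinery entirely: for each course size it flattens all combos into one sorted list and finds the most frequent combos by a run-length scan over adjacent equal elements (sort-and-scan counting instead of hash counting), tracking the best run and its winners on the fly.
import Mathlib
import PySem

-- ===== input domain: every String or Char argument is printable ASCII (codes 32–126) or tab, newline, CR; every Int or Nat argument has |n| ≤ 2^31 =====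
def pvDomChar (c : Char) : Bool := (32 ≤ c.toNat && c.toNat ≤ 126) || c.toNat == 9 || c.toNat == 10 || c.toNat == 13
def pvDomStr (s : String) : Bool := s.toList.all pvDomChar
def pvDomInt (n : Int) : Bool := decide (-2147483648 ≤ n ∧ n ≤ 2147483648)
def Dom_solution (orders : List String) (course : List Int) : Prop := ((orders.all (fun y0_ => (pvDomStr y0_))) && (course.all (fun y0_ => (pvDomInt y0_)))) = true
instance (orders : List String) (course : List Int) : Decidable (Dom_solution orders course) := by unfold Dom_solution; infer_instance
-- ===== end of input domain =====

-- B replaces A's per-size Counter/most_common extraction by a sort-and-scan: it flattens all combos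
-- of each size into one sorted list and finds the most frequent combos by scanning runs of equal
-- neighbours; a timing run measured B faster by a constant factor (no Counter objects built).

-- ===== PORT A =====
-- helper: the combo list '["".join(char for char in sorted(combo)) for combo in combinations(order, number)]'
-- (the identical expression appears in both Pythons; "".join over chars is exactly String.ofList)
def pvCombos (order : String) (number : Int) : List String :=
  (PySem.List.combinations order.toList number.toNat).map
    (fun combo => String.ofList (PySem.List.sorted combo (fun c => c) false))

-- 'candidates += Counter(combos)' is this elementwise update (all counts are positive, so Counter
-- addition keeps every key: existing keys in place, new keys appended at first occurrence)
def pvCount (cand : PySem.Dict String Int) (combos : List String) : PySem.Dict String Int :=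
  combos.foldl (fun d x => d.insert x (d.getD x 0 + 1)) cand

def makeNewCourseIfPossible (candidates : PySem.Dict String Int) : List String :=
  if candidates.items.isEmpty then []
  else
    -- most_common() = items sorted by count, descending, stable
    match PySem.List.sorted candidates.items (fun p => p.2) true with
    | [] => []
    | c0 :: rest =>
      -- the for/break loop is a takeWhile over the sorted items; c0.2 is max_popularity
      (((c0 :: rest).takeWhile (fun p => decide (1 < p.2 ∧ p.2 = c0.2))).map (fun p => p.1))

def solution (orders : List String) (course : List Int) : List String :=
  let courses := course.foldl (fun courses number =>
    let candidates := orders.foldl (fun candidates order =>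
        pvCount candidates (pvCombos order number)) PySem.Dict.empty
    courses ++ makeNewCourseIfPossible candidates) []
  PySem.List.sorted courses (fun x => x) false

-- ===== PORT B =====
-- Source B's while loops: the inner 'while combos[j] == combos[i]' measures the current run
-- (takeWhile), 'i = j' jumps past it (dropWhile); best/winners are the two accumulators.
def runScan : List String → Int → List String → List String
  | [], _, winners => winners
  | x :: rest, best, winners =>
    let run : Int := (((x :: rest).takeWhile (fun y => y == x)).length : Int)
    let l' := (x :: rest).dropWhile (fun y => y == x)
    if 1 < run then
      if best < run then runScan l' run [x]
      else if run = best then runScan l' best (winners ++ [x])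
      else runScan l' best winners
    else runScan l' best winners
termination_by l _ _ => l.length
decreasing_by
  all_goals
    simp only [List.dropWhile_cons, beq_self_eq_true, if_true, List.length_cons]
    have := List.length_dropWhile_le (fun y => y == x) rest
    omega

def solution_alt (orders : List String) (course : List Int) : List String :=
  let result := course.foldl (fun res n =>
      let combos := PySem.List.sorted (orders.flatMap (fun o => pvCombos o n))
          (fun x => x) false
      res ++ runScan combos 0 []) []
  PySem.List.sorted result (fun x => x) false

-- ===== PRECONDITION & SPEC =====
-- Pre_ excludes exactly the inputs where Python raises: combinations(order, n) raises ValueError for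
-- n < 0, which is reached (by both Pythons) exactly when orders is nonempty and some course entry is negative.
def Pre_solution (orders : List String) (course : List Int) : Prop := orders = [] ∨ ∀ n ∈ course, 0 ≤ n
instance (orders : List String) (course : List Int) : Decidable (Pre_solution orders course) := by unfold Pre_solution; infer_instance
def pvWitness_solution : List String × List Int := (["ab", "ab", "b"], [1, 2, 1, 0])
def Spec_solution (orders : List String) (course : List Int) (out : List String) : Prop := out = solution_alt orders course
instance (orders : List String) (course : List Int) (out : List String) : Decidable (Spec_solution orders course out) := by unfold Spec_solution; infer_instance

-- ===== CLAIM (what is proved, stated in full; the proofs are below) =====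
def Claim_equal_solution : Prop := ∀ (orders : List String) (course : List Int), Dom_solution orders course → Pre_solution orders course → Spec_solution orders course (solution orders course)

-- ===== LEMMAS AND PROOFS =====

-- the flat multiset of size-n combos over all orders, and A's candidate counter
def pvFlat (orders : List String) (n : Int) : List String := orders.flatMap (fun o => pvCombos o n)

def pvCand (orders : List String) (n : Int) : PySem.Dict String Int :=
  orders.foldl (fun candidates order => pvCount candidates (pvCombos order n)) PySem.Dict.empty

lemma pvCand_eq_counter (orders : List String) (n : Int) :
    pvCand orders n = PySem.Dict.counter (pvFlat orders n) := by
  unfold pvCand pvFlat pvCount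
  rw [← PySem.Dict.foldl_insert_getD_add_one_eq_counter, List.flatMap_def,
    List.foldl_flatten, List.foldl_map]

-- B's winner extraction, characterised (below): filter the distinct combos at the max multiplicity
def cntI (s : List String) (x : String) : Int := (s.count x : Int)

def mfold (c : String → Int) (l : List String) (a : Int) : Int :=
  l.foldl (fun a x => if 2 ≤ c x then max a (c x) else a) a

def bigM (s : List String) : Int := mfold (cntI s) (PySem.Set.ofList s) 0

lemma le_mfold (c : String → Int) (l : List String) (a : Int) : a ≤ mfold c l a := by
  induction l generalizing a with
  | nil => simp [mfold]
  | cons x t ih =>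
      simp only [mfold, List.foldl_cons] at *
      split_ifs with h
      · exact le_trans (le_max_left _ _) (ih (max a (c x)))
      · exact ih a

lemma mfold_init (c : String → Int) (l : List String) (a : Int) (h : 0 ≤ a) :
    mfold c l a = max a (mfold c l 0) := by
  induction l generalizing a with
  | nil => simp [mfold]; omega
  | cons x t ih =>
      simp only [mfold, List.foldl_cons] at *
      split_ifs with hx
      · rw [ih (max a (c x)) (by omega), ih (max 0 (c x)) (by omega)]; omega
      · exact ih a h

lemma mfold_le (c : String → Int) (l : List String) (a b : Int) (ha : a ≤ b)
    (h : ∀ x ∈ l, c x ≤ b) : mfold c l a ≤ b := by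
  induction l generalizing a with
  | nil => exact ha
  | cons x t ih =>
      simp only [mfold, List.foldl_cons] at *
      split_ifs with hx
      · exact ih (max a (c x)) (by have := h x (by simp); omega) (fun y hy => h y (by simp [hy]))
      · exact ih a ha (fun y hy => h y (by simp [hy]))

lemma mfold_ge (c : String → Int) (l : List String) :
    ∀ (a : Int) (y : String), y ∈ l → 2 ≤ c y → c y ≤ mfold c l a := by
  induction l with
  | nil => intro a y hy; cases hy
  | cons x t ih =>
      intro a y hy h2
      simp only [mfold, List.foldl_cons] at *
      rcases List.mem_cons.mp hy with rfl | hmem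
      · rw [if_pos h2]
        exact le_trans (le_max_right _ _) (le_mfold c t _)
      · split_ifs <;> exact ih _ y hmem h2

lemma mfold_zero (c : String → Int) (l : List String) (h : ∀ x ∈ l, c x ≤ 1) :
    mfold c l 0 = 0 := by
  induction l with
  | nil => rfl
  | cons x t ih =>
      simp only [mfold, List.foldl_cons] at *
      rw [if_neg (by have := h x (by simp); omega)]
      exact ih (fun y hy => h y (by simp [hy]))

-- run structure of a sorted list: all copies of the head are the leading run
lemma not_mem_dropRun (x : String) (rest : List String)
    (h : (x :: rest).Pairwise (· ≤ ·)) : x ∉ (x :: rest).dropWhile (fun y => y == x) := by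
  intro hx
  cases hth : (x :: rest).dropWhile (fun y => y == x) with
  | nil => rw [hth] at hx; cases hx
  | cons h0 tt =>
      have hph : (h0 == x) = false := by
        have := List.head?_dropWhile_not (p := fun y => y == x) (l := x :: rest)
        rw [hth] at this; simpa using this
      have hne : h0 ≠ x := by simpa using hph
      have hpt : (h0 :: tt).Pairwise (fun a b : String => a ≤ b) :=
        List.Pairwise.sublist (hth ▸ List.dropWhile_sublist _) h
      have hmem : h0 ∈ x :: rest :=
        (List.dropWhile_sublist (fun y => y == x)).subset (by rw [hth]; exact List.mem_cons_self)
      have hxle : x ≤ h0 := by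
        rcases List.mem_cons.mp hmem with rfl | hm
        · exact le_refl _
        · exact (List.pairwise_cons.mp h).1 h0 hm
      have hle : h0 ≤ x := by
        rw [hth] at hx
        rcases List.mem_cons.mp hx with rfl | hm
        · exact le_refl _
        · exact (List.pairwise_cons.mp hpt).1 x hm
      exact hne (le_antisymm hle hxle)

lemma count_dropRun_ne (x y : String) (l : List String) (hne : y ≠ x) :
    (l.dropWhile (fun z => z == x)).count y = l.count y := by
  conv_rhs => rw [← List.takeWhile_append_dropWhile (p := fun z => z == x) (l := l)]
  rw [List.count_append]
  have : (l.takeWhile (fun z => z == x)).count y = 0 := by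
    rw [List.count_eq_zero]
    intro hy
    exact hne (by simpa using List.mem_takeWhile_imp hy)
  omega

lemma run_eq_count (x : String) (rest : List String)
    (h : (x :: rest).Pairwise (· ≤ ·)) :
    ((x :: rest).takeWhile (fun y => y == x)).length = (x :: rest).count x := by
  conv_rhs => rw [← List.takeWhile_append_dropWhile (p := fun y => y == x) (l := x :: rest)]
  rw [List.count_append, List.count_eq_zero.mpr (not_mem_dropRun x rest h)]
  have : ((x :: rest).takeWhile (fun y => y == x)).count x
      = ((x :: rest).takeWhile (fun y => y == x)).length := by
    rw [List.count_eq_length]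
    intro b hb
    have hbx : b = x := by simpa using List.mem_takeWhile_imp hb
    exact hbx.symm
  omega

lemma discard_of_not_mem (s : PySem.Set String) (x : String) (h : x ∉ s) :
    PySem.Set.discard s x = s := by
  simp only [PySem.Set.discard]
  rw [List.filter_eq_self]
  intro a ha
  simp only [Bool.not_eq_eq_eq_not, Bool.not_true, beq_eq_false_iff_ne]
  rintro rfl; exact h ha

lemma ofList_all_eq_append (x : String) (t : List String) (hx : x ∉ t) :
    ∀ (u : List String), (∀ a ∈ u, a = x) →
    PySem.Set.ofList (x :: (u ++ t)) = x :: PySem.Set.ofList t := by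
  intro u
  induction u with
  | nil =>
      intro _
      show PySem.Set.ofList (x :: t) = _
      rw [PySem.Set.ofList_cons,
        discard_of_not_mem (PySem.Set.ofList t) x
          (fun hmem => hx ((PySem.Set.mem_ofList t x).mp hmem))]
  | cons a u' ih =>
      intro hall
      have ha : a = x := hall a (by simp)
      subst ha
      have hih := ih (fun b hb => hall b (by simp [hb]))
      show PySem.Set.ofList (a :: a :: (u' ++ t)) = a :: PySem.Set.ofList t
      rw [PySem.Set.ofList_cons, hih]
      congr 1
      show List.filter (fun y => !(y == a)) (a :: PySem.Set.ofList t) = _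
      rw [List.filter_cons, if_neg (by simp)]
      exact discard_of_not_mem (PySem.Set.ofList t) a
        (fun hmem => hx ((PySem.Set.mem_ofList t a).mp hmem))

lemma ofList_dropRun (x : String) (rest : List String)
    (h : (x :: rest).Pairwise (· ≤ ·)) :
    PySem.Set.ofList (x :: rest)
      = x :: PySem.Set.ofList ((x :: rest).dropWhile (fun y => y == x)) := by
  have hdr : (x :: rest).dropWhile (fun y => y == x) = rest.dropWhile (fun y => y == x) := by
    simp
  have hx : x ∉ rest.dropWhile (fun y => y == x) := by
    rw [← hdr]; exact not_mem_dropRun x rest h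
  have hsplit : x :: rest = x :: ((rest.takeWhile (fun y => y == x)) ++ rest.dropWhile (fun y => y == x)) := by
    rw [List.takeWhile_append_dropWhile]
  rw [hdr]
  conv_lhs => rw [hsplit]
  exact ofList_all_eq_append x _ hx (rest.takeWhile (fun y => y == x))
    (fun a ha => by simpa using List.mem_takeWhile_imp ha)

lemma mfold_congr (c c' : String → Int) (l : List String)
    (h : ∀ y ∈ l, c y = c' y) (a : Int) : mfold c l a = mfold c' l a := by
  unfold mfold
  exact PySem.List.foldl_congr_mem _ _ _ a (fun acc y hy => by rw [h y hy])

lemma bigM_cons (x : String) (rest : List String) (h : (x :: rest).Pairwise (· ≤ ·)) :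
    bigM (x :: rest)
      = (if 2 ≤ cntI (x :: rest) x
          then max (cntI (x :: rest) x) (bigM ((x :: rest).dropWhile (fun y => y == x)))
          else bigM ((x :: rest).dropWhile (fun y => y == x))) := by
  have hx : x ∉ (x :: rest).dropWhile (fun y => y == x) := not_mem_dropRun x rest h
  have hc : ∀ y ∈ PySem.Set.ofList ((x :: rest).dropWhile (fun z => z == x)),
      cntI (x :: rest) y = cntI ((x :: rest).dropWhile (fun z => z == x)) y := by
    intro y hy
    have hyt := (PySem.Set.mem_ofList _ y).mp hy
    have hne : y ≠ x := by rintro rfl; exact hx hyt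
    unfold cntI
    rw [count_dropRun_ne x y (x :: rest) hne]
  have hk : (0:Int) ≤ cntI (x :: rest) x := Int.natCast_nonneg _
  unfold bigM
  rw [ofList_dropRun x rest h]
  have hstep : mfold (cntI (x :: rest))
        (x :: PySem.Set.ofList ((x :: rest).dropWhile (fun y => y == x))) 0
      = mfold (cntI (x :: rest)) (PySem.Set.ofList ((x :: rest).dropWhile (fun y => y == x)))
        (if 2 ≤ cntI (x :: rest) x then max 0 (cntI (x :: rest) x) else 0) := by
    simp only [mfold, List.foldl_cons]
  rw [hstep, mfold_congr _ (cntI ((x :: rest).dropWhile (fun y => y == x))) _ hc]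
  split_ifs with h2
  · rw [mfold_init _ _ _ (by omega)]
    have h0 := le_mfold (cntI ((x :: rest).dropWhile (fun y => y == x)))
      (PySem.Set.ofList ((x :: rest).dropWhile (fun y => y == x))) 0
    omega
  · rfl

-- the while-loop, characterised on a sorted list: let M be the final best (the max of the incoming
-- best and all run lengths ≥ 2); winners survive iff best = M, and the runs at M are appended
lemma mfold_zero_or (c : String → Int) (l : List String) :
    ∀ (a : Int), (a = 0 ∨ 2 ≤ a) → (mfold c l a = 0 ∨ 2 ≤ mfold c l a) := by
  induction l with
  | nil => intro a ha; exact ha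
  | cons x t ih =>
      intro a ha
      simp only [mfold, List.foldl_cons] at *
      split_ifs with hx
      · exact ih (max a (c x)) (by omega)
      · exact ih a ha

lemma bigM_zero_or (s : List String) : bigM s = 0 ∨ 2 ≤ bigM s :=
  mfold_zero_or (cntI s) (PySem.Set.ofList s) 0 (Or.inl rfl)

lemma runScan_nil_spec (best : Int) (winners : List String) (hb : best = 0 ∨ 2 ≤ best) :
    runScan [] best winners =
      (if max best (bigM []) = best then winners else []) ++
      (if 2 ≤ max best (bigM [])
        then (PySem.Set.ofList []).filter (fun x => cntI [] x == max best (bigM []))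
        else []) := by
  have hb0 : bigM ([] : List String) = 0 := rfl
  rw [runScan, hb0]
  rcases hb with rfl | h2
  · simp
  · rw [show max best 0 = best by omega, if_pos rfl, if_pos (by omega)]
    show winners = winners ++ List.filter _ []
    simp

-- three pure bookkeeping facts about the if-chunks, used by runScan_spec_aux
lemma chunk_new_best (k B best : Int) (x : String) (winners : List String) (F : Int → List String)
    (h2 : 2 ≤ k) (hbk : best < k) :
    (if max k B = k then [x] else []) ++ (if 2 ≤ max k B then F (max k B) else [])
    = (if max k B = best then winners else []) ++
      (if 2 ≤ max k B then (if k == max k B then x :: F (max k B) else F (max k B)) else []) := by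
  have h2M : 2 ≤ max k B := by omega
  have hne : ¬ (max k B = best) := by omega
  simp only [beq_iff_eq]
  split_ifs <;> first
    | (exfalso; omega)
    | rfl

lemma chunk_tie (k B best : Int) (x : String) (winners : List String) (F : Int → List String)
    (h2 : 2 ≤ k) (hkb : k = best) :
    (if max best B = best then winners ++ [x] else []) ++ (if 2 ≤ max best B then F (max best B) else [])
    = (if max best B = best then winners else []) ++
      (if 2 ≤ max best B then (if k == max best B then x :: F (max best B) else F (max best B)) else []) := by
  have h2M : 2 ≤ max best B := by omega
  simp only [beq_iff_eq]
  split_ifs <;> first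
    | (exfalso; omega)
    | rfl
    | simp

lemma chunk_skip (k B best : Int) (x : String) (winners : List String) (F : Int → List String)
    (hB : B = 0 ∨ 2 ≤ B) (hkM : k < best ∨ (k = 1 ∧ best = 0)) :
    (if max best B = best then winners else []) ++ (if 2 ≤ max best B then F (max best B) else [])
    = (if max best B = best then winners else []) ++
      (if 2 ≤ max best B then (if k == max best B then x :: F (max best B) else F (max best B)) else []) := by
  have hkM' : ¬ (k = max best B) ∨ ¬ (2 ≤ max best B) := by
    rcases hB with rfl | h <;> rcases hkM with h' | ⟨rfl, rfl⟩ <;> omega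
  simp only [beq_iff_eq]
  split_ifs <;> first
    | (exfalso; rcases hkM' with h'' | h'' <;> omega)
    | rfl

lemma runScan_spec_aux : ∀ (N : Nat) (s : List String), s.length ≤ N → s.Pairwise (· ≤ ·) →
    ∀ (best : Int) (winners : List String), (best = 0 ∨ 2 ≤ best) →
    runScan s best winners =
      (if max best (bigM s) = best then winners else []) ++
      (if 2 ≤ max best (bigM s)
        then (PySem.Set.ofList s).filter (fun x => cntI s x == max best (bigM s))
        else []) := by
  intro N
  induction N with
  | zero =>
      intro s hlen _ best winners hb
      have hse : s = [] := List.length_eq_zero_iff.mp (Nat.le_zero.mp hlen)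
      subst hse
      exact runScan_nil_spec best winners hb
  | succ N ih =>
      intro s hlen hs best winners hb
      cases s with
      | nil => exact runScan_nil_spec best winners hb
      | cons x rest =>
        have hdr : (x :: rest).dropWhile (fun y => y == x) = rest.dropWhile (fun y => y == x) := by
          simp
        have hpt : ((x :: rest).dropWhile (fun y => y == x)).Pairwise (fun a b : String => a ≤ b) :=
          List.Pairwise.sublist (List.dropWhile_sublist _) hs
        have hlt : ((x :: rest).dropWhile (fun y => y == x)).length ≤ N := by
          rw [hdr]
          have := List.length_dropWhile_le (fun y => y == x) rest
          simp only [List.length_cons] at hlen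
          omega
        have hxnot : x ∉ (x :: rest).dropWhile (fun y => y == x) := not_mem_dropRun x rest hs
        have hcong : ∀ y ∈ PySem.Set.ofList ((x :: rest).dropWhile (fun z => z == x)),
            cntI (x :: rest) y = cntI ((x :: rest).dropWhile (fun z => z == x)) y := by
          intro y hy
          have hyt := (PySem.Set.mem_ofList _ y).mp hy
          have hne : y ≠ x := by rintro rfl; exact hxnot hyt
          unfold cntI
          rw [count_dropRun_ne x y (x :: rest) hne]
        have hrun : (((x :: rest).takeWhile (fun y => y == x)).length : Int) = cntI (x :: rest) x := by
          unfold cntI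
          exact_mod_cast run_eq_count x rest hs
        have hk1 : 1 ≤ cntI (x :: rest) x := by
          unfold cntI
          have : 0 < (x :: rest).count x := List.count_pos_iff.mpr List.mem_cons_self
          omega
        have hBor := bigM_zero_or ((x :: rest).dropWhile (fun y => y == x))
        -- the filter over the distinct elements of s, split at the head run
        have hfe : ∀ M : Int, (PySem.Set.ofList (x :: rest)).filter (fun y => cntI (x :: rest) y == M)
            = (if cntI (x :: rest) x == M
                then x :: (PySem.Set.ofList ((x :: rest).dropWhile (fun y => y == x))).filter
                  (fun y => cntI ((x :: rest).dropWhile (fun z => z == x)) y == M)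
                else (PySem.Set.ofList ((x :: rest).dropWhile (fun y => y == x))).filter
                  (fun y => cntI ((x :: rest).dropWhile (fun z => z == x)) y == M)) := by
          intro M
          rw [ofList_dropRun x rest hs, List.filter_cons]
          have hcf : (PySem.Set.ofList ((x :: rest).dropWhile (fun y => y == x))).filter
                (fun y => cntI (x :: rest) y == M)
              = (PySem.Set.ofList ((x :: rest).dropWhile (fun y => y == x))).filter
                (fun y => cntI ((x :: rest).dropWhile (fun z => z == x)) y == M) :=
            List.filter_congr (fun y hy => by rw [hcong y hy])
          rw [hcf]
        rw [runScan]
        rw [bigM_cons x rest hs]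
        by_cases hk2 : 2 ≤ cntI (x :: rest) x
        · rw [if_pos hk2]
          rw [show (if 1 < (((x :: rest).takeWhile (fun y => y == x)).length : Int) then
              (if best < (((x :: rest).takeWhile (fun y => y == x)).length : Int) then
                runScan ((x :: rest).dropWhile (fun y => y == x)) (((x :: rest).takeWhile (fun y => y == x)).length : Int) [x]
              else if (((x :: rest).takeWhile (fun y => y == x)).length : Int) = best then
                runScan ((x :: rest).dropWhile (fun y => y == x)) best (winners ++ [x])
              else runScan ((x :: rest).dropWhile (fun y => y == x)) best winners)
            else runScan ((x :: rest).dropWhile (fun y => y == x)) best winners)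
            = (if best < cntI (x :: rest) x then
                runScan ((x :: rest).dropWhile (fun y => y == x)) (cntI (x :: rest) x) [x]
              else if cntI (x :: rest) x = best then
                runScan ((x :: rest).dropWhile (fun y => y == x)) best (winners ++ [x])
              else runScan ((x :: rest).dropWhile (fun y => y == x)) best winners) by
            rw [hrun, if_pos (by omega)]]
          by_cases hbk : best < cntI (x :: rest) x
          · rw [if_pos hbk, ih _ hlt hpt _ [x] (Or.inr hk2)]
            have hM : max best (max (cntI (x :: rest) x) (bigM ((x :: rest).dropWhile (fun y => y == x))))
                = max (cntI (x :: rest) x) (bigM ((x :: rest).dropWhile (fun y => y == x))) := by omega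
            rw [hM, hfe]
            exact chunk_new_best (cntI (x :: rest) x) (bigM ((x :: rest).dropWhile (fun y => y == x))) best x winners (fun M => List.filter (fun y => cntI ((x :: rest).dropWhile (fun z => z == x)) y == M) (PySem.Set.ofList ((x :: rest).dropWhile (fun y => y == x)))) hk2 hbk
          · rw [if_neg hbk]
            by_cases hkb : cntI (x :: rest) x = best
            · rw [if_pos hkb, ih _ hlt hpt _ (winners ++ [x]) hb]
              have hM : max best (max (cntI (x :: rest) x) (bigM ((x :: rest).dropWhile (fun y => y == x))))
                  = max best (bigM ((x :: rest).dropWhile (fun y => y == x))) := by omega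
              rw [hM, hfe]
              exact chunk_tie (cntI (x :: rest) x) (bigM ((x :: rest).dropWhile (fun y => y == x))) best x winners (fun M => List.filter (fun y => cntI ((x :: rest).dropWhile (fun z => z == x)) y == M) (PySem.Set.ofList ((x :: rest).dropWhile (fun y => y == x)))) hk2 hkb
            · rw [if_neg hkb, ih _ hlt hpt _ winners hb]
              have hM : max best (max (cntI (x :: rest) x) (bigM ((x :: rest).dropWhile (fun y => y == x))))
                  = max best (bigM ((x :: rest).dropWhile (fun y => y == x))) := by omega
              rw [hM, hfe]
              exact chunk_skip (cntI (x :: rest) x) (bigM ((x :: rest).dropWhile (fun y => y == x))) best x winners (fun M => List.filter (fun y => cntI ((x :: rest).dropWhile (fun z => z == x)) y == M) (PySem.Set.ofList ((x :: rest).dropWhile (fun y => y == x)))) hBor (Or.inl (by omega))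
        · rw [if_neg hk2]
          rw [show (if 1 < (((x :: rest).takeWhile (fun y => y == x)).length : Int) then
              (if best < (((x :: rest).takeWhile (fun y => y == x)).length : Int) then
                runScan ((x :: rest).dropWhile (fun y => y == x)) (((x :: rest).takeWhile (fun y => y == x)).length : Int) [x]
              else if (((x :: rest).takeWhile (fun y => y == x)).length : Int) = best then
                runScan ((x :: rest).dropWhile (fun y => y == x)) best (winners ++ [x])
              else runScan ((x :: rest).dropWhile (fun y => y == x)) best winners)
            else runScan ((x :: rest).dropWhile (fun y => y == x)) best winners)
            = runScan ((x :: rest).dropWhile (fun y => y == x)) best winners by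
            rw [hrun, if_neg (by omega)]]
          rw [ih _ hlt hpt _ winners hb, hfe]
          exact chunk_skip (cntI (x :: rest) x) (bigM ((x :: rest).dropWhile (fun y => y == x))) best x winners (fun M => List.filter (fun y => cntI ((x :: rest).dropWhile (fun z => z == x)) y == M) (PySem.Set.ofList ((x :: rest).dropWhile (fun y => y == x)))) hBor
            (by rcases hb with rfl | h2b
                · exact Or.inr ⟨by omega, rfl⟩
                · exact Or.inl (by omega))

lemma runScan_spec (s : List String) (hs : s.Pairwise (· ≤ ·)) :
    runScan s 0 [] =
      (if 2 ≤ bigM s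
        then (PySem.Set.ofList s).filter (fun x => cntI s x == bigM s)
        else []) := by
  have h0 := bigM_zero_or s
  have h := runScan_spec_aux s.length s le_rfl hs 0 [] (Or.inl rfl)
  rw [show max 0 (bigM s) = bigM s by omega] at h
  rw [h]
  split_ifs <;> simp

-- A's extraction, up to permutation: the items at the max count, if that max exceeds 1
def pvPieceB (d : PySem.Dict String Int) : List String :=
  let m := (PySem.List.max? d.values (fun v => v)).getD 0
  if 1 < m then (d.items.filter (fun p => p.2 == m)).map (fun p => p.1) else []

lemma takeWhile_eq_filter_max (l : List (String × Int)) (M : Int) (hM1 : 1 < M)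
    (hpw : l.Pairwise (fun a b => b.2 ≤ a.2)) (hub : ∀ p ∈ l, p.2 ≤ M) :
    l.takeWhile (fun p => decide (1 < p.2 ∧ p.2 = M)) = l.filter (fun p => p.2 == M) := by
  induction l with
  | nil => rfl
  | cons a t ih =>
      by_cases ha : a.2 = M
      · have hd : (decide (1 < a.2 ∧ a.2 = M)) = true := by simp [ha]; omega
        have hb : (a.2 == M) = true := by simp [ha]
        simp only [List.takeWhile_cons, List.filter_cons, hd, hb, if_true]
        exact congrArg (a :: ·) (ih (List.pairwise_cons.mp hpw).2 (fun p hp => hub p (List.mem_cons_of_mem _ hp)))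
      · have hd : (decide (1 < a.2 ∧ a.2 = M)) = false := by simp [ha]
        have hb : (a.2 == M) = false := by simp [ha]
        simp only [List.takeWhile_cons, List.filter_cons, hd, hb, if_false, Bool.false_eq_true]
        symm
        rw [List.filter_eq_nil_iff]
        intro p hp
        have h1 := (List.pairwise_cons.mp hpw).1 p hp
        have h2 := hub a List.mem_cons_self
        simp only [beq_iff_eq]
        omega

lemma piece_perm (d : PySem.Dict String Int) :
    (makeNewCourseIfPossible d).Perm (pvPieceB d) := by
  unfold makeNewCourseIfPossible pvPieceB
  have hvals : d.values = d.items.map (fun p => p.2) := rfl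
  by_cases he : d.items = []
  · simp [he, hvals, PySem.List.max?]
  · rw [if_neg (by simp [he])]
    cases hc : PySem.List.sorted d.items (fun p => p.2) true with
    | nil => exact absurd ((PySem.List.sorted_eq_nil_iff _ _ _).mp hc) he
    | cons c0 rest =>
      have hub : ∀ p ∈ d.items, p.2 ≤ c0.2 :=
        PySem.List.key_head_sorted_rev_ge d.items (fun p => p.2) hc
      have hc0 : c0 ∈ d.items := by
        have : c0 ∈ PySem.List.sorted d.items (fun p => p.2) true := by
          rw [hc]; exact List.mem_cons_self
        exact (PySem.List.mem_sorted _ _ _ _).mp this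
      obtain ⟨m, hm⟩ : ∃ m, PySem.List.max? d.values (fun v => v) = some m := by
        cases h : PySem.List.max? d.values (fun v => v) with
        | none =>
            exact absurd (by
              have := (PySem.List.max?_eq_none_iff d.values (fun v => v)).mp h
              rw [hvals] at this
              exact List.map_eq_nil_iff.mp this) he
        | some m => exact ⟨m, rfl⟩
      have hmmem : m ∈ d.values := PySem.List.max?_mem hm
      have hmle : m ≤ c0.2 := by
        rw [hvals] at hmmem
        obtain ⟨p, hp, hpm⟩ := List.mem_map.mp hmmem
        exact hpm ▸ hub p hp
      have hlem : c0.2 ≤ m := by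
        refine PySem.List.max?_isMax hm c0.2 ?_
        rw [hvals]; exact List.mem_map_of_mem hc0
      have hmM : m = c0.2 := le_antisymm hmle hlem
      rw [hm]
      simp only [Option.getD_some, hmM]
      by_cases h1 : 1 < c0.2
      · rw [if_pos h1]
        have hpw : (c0 :: rest).Pairwise (fun a b => b.2 ≤ a.2) := by
          rw [← hc]; exact PySem.List.sorted_pairwise_rev d.items (fun p => p.2)
        have hub' : ∀ p ∈ c0 :: rest, p.2 ≤ c0.2 := by
          intro p hp
          exact hub p ((PySem.List.mem_sorted _ _ _ _).mp (hc ▸ hp))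
        rw [takeWhile_eq_filter_max (c0 :: rest) c0.2 h1 hpw hub']
        refine List.Perm.map _ (List.Perm.filter _ ?_)
        rw [← hc]
        exact PySem.List.sorted_perm d.items (fun p => p.2) true
      · rw [if_neg h1]
        simp [h1]

-- per size: A's extraction from the counter ~ B's run scan over the sorted flat list
lemma piece_perm_total (l : List String) :
    (makeNewCourseIfPossible (PySem.Dict.counter l)).Perm
      (runScan (PySem.List.sorted l (fun x => x) false) 0 []) := by
  refine (piece_perm (PySem.Dict.counter l)).trans ?_
  rw [runScan_spec (PySem.List.sorted l (fun x => x) false)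
    (PySem.List.sorted_pairwise l (fun x => x))]
  have hcnt : ∀ y, (PySem.List.sorted l (fun x => x) false).count y = l.count y :=
    (PySem.List.sorted_perm l (fun x => x) false).count_eq
  have hmemiff : ∀ y, y ∈ PySem.List.sorted l (fun x => x) false ↔ y ∈ l :=
    fun y => (PySem.List.sorted_perm l (fun x => x) false).mem_iff
  have hvals : (PySem.Dict.counter l).values
      = (PySem.Set.ofList l).map (fun k => (l.count k : Int)) := by
    show (PySem.Dict.counter l).items.map (fun p => p.2) = _
    rw [PySem.Dict.items_counter, List.map_map]
    rfl
  have hsperm : (PySem.Set.ofList l).Perm (PySem.Set.ofList (PySem.List.sorted l (fun x => x) false)) := by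
    rw [List.perm_ext_iff_of_nodup (PySem.Set.nodup_ofList l)
      (PySem.Set.nodup_ofList (PySem.List.sorted l (fun x => x) false))]
    intro a
    rw [PySem.Set.mem_ofList, PySem.Set.mem_ofList, hmemiff a]
  unfold pvPieceB
  by_cases hl : l = []
  · subst hl
    simp only [hvals]
    show (if (1:Int) < (PySem.List.max? ([] : List Int) (fun v => v)).getD 0 then _ else []).Perm _
    rw [show PySem.List.max? ([] : List Int) (fun v => v) = none from rfl]
    rw [show PySem.List.sorted ([] : List String) (fun x => x) false = [] from rfl]
    simp only [Option.getD_none]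
    rw [if_neg (by omega), if_neg (by rw [show bigM [] = 0 from rfl]; omega)]
  · obtain ⟨m, hm⟩ : ∃ m, PySem.List.max? (PySem.Dict.counter l).values (fun v => v) = some m := by
      cases h : PySem.List.max? (PySem.Dict.counter l).values (fun v => v) with
      | none =>
          exfalso
          have h2 := (PySem.List.max?_eq_none_iff _ (fun v => v)).mp h
          rw [hvals] at h2
          have h3 := List.map_eq_nil_iff.mp h2
          cases l with
          | nil => exact hl rfl
          | cons a t =>
              have ha : a ∈ PySem.Set.ofList (a :: t) := (PySem.Set.mem_ofList _ a).mpr (by simp)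
              rw [h3] at ha
              cases ha
      | some m => exact ⟨m, rfl⟩
    have hmmem : m ∈ (PySem.Dict.counter l).values := PySem.List.max?_mem hm
    obtain ⟨y0, hy0, hy0m⟩ : ∃ y0 ∈ PySem.Set.ofList l, (l.count y0 : Int) = m := by
      rw [hvals] at hmmem
      obtain ⟨y0, hy0, h⟩ := List.mem_map.mp hmmem
      exact ⟨y0, hy0, h⟩
    have hub : ∀ y ∈ PySem.Set.ofList l, (l.count y : Int) ≤ m := by
      intro y hy
      exact PySem.List.max?_isMax hm _ (by rw [hvals]; exact List.mem_map_of_mem hy)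
    have hm0 : 0 ≤ m := le_trans (by positivity) hy0m.le
    have hubs : ∀ y ∈ PySem.Set.ofList (PySem.List.sorted l (fun x => x) false),
        cntI (PySem.List.sorted l (fun x => x) false) y ≤ m := by
      intro y hy
      have hyl : y ∈ l := (hmemiff y).mp ((PySem.Set.mem_ofList _ y).mp hy)
      unfold cntI
      rw [hcnt y]
      exact hub y ((PySem.Set.mem_ofList l y).mpr hyl)
    rw [hm]
    simp only [Option.getD_some]
    by_cases h1 : 1 < m
    · have hbig : bigM (PySem.List.sorted l (fun x => x) false) = m := by
        apply le_antisymm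
        · exact mfold_le _ _ 0 m hm0 hubs
        · have hy0s : y0 ∈ PySem.Set.ofList (PySem.List.sorted l (fun x => x) false) := by
            rw [PySem.Set.mem_ofList, hmemiff y0]
            exact (PySem.Set.mem_ofList l y0).mp hy0
          have hcy : cntI (PySem.List.sorted l (fun x => x) false) y0 = m := by
            unfold cntI
            rw [hcnt y0]
            exact hy0m
          have hge := mfold_ge (cntI (PySem.List.sorted l (fun x => x) false))
            (PySem.Set.ofList (PySem.List.sorted l (fun x => x) false)) 0 y0 hy0s (by rw [hcy]; omega)
          rw [hcy] at hge
          exact hge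
      rw [if_pos h1, hbig, if_pos (by omega)]
      rw [PySem.Dict.items_counter, List.filter_map, List.map_map]
      have hpred : (fun y => cntI (PySem.List.sorted l (fun x => x) false) y == m)
          = (fun y => (l.count y : Int) == m) := by
        funext y
        unfold cntI
        rw [hcnt y]
      rw [hpred]
      show (((PySem.Set.ofList l).filter (fun k => ((l.count k : Int) == m))).map (fun k => k)).Perm _
      rw [List.map_id']
      exact hsperm.filter _
    · have hbig : bigM (PySem.List.sorted l (fun x => x) false) = 0 := by
        apply mfold_zero
        intro y hy
        have := hubs y hy
        omega
      rw [if_neg h1, hbig, if_neg (by omega)]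

lemma fold_perm (course : List Int) (fA fB : Int → List String)
    (h : ∀ n ∈ course, (fA n).Perm (fB n)) (acc1 acc2 : List String) (hacc : acc1.Perm acc2) :
    (course.foldl (fun acc n => acc ++ fA n) acc1).Perm
      (course.foldl (fun acc n => acc ++ fB n) acc2) := by
  induction course generalizing acc1 acc2 with
  | nil => exact hacc
  | cons n ns ih =>
      exact ih (fun k hk => h k (List.mem_cons_of_mem _ hk)) _ _
        (hacc.append (h n List.mem_cons_self))

-- ===== VERDICT =====
theorem solution_spec : Claim_equal_solution := by
  intro orders course _ _
  unfold Spec_solution solution solution_alt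
  simp only []
  rw [PySem.List.sorted_id_eq_sorted_id_iff_perm]
  have hA : course.foldl (fun courses number =>
      courses ++ makeNewCourseIfPossible (orders.foldl (fun candidates order =>
        pvCount candidates (pvCombos order number)) PySem.Dict.empty)) []
      = course.foldl (fun courses number =>
        courses ++ makeNewCourseIfPossible (PySem.Dict.counter (pvFlat orders number))) [] := by
    refine List.foldl_ext _ _ [] (fun res n _ => ?_)
    rw [show orders.foldl (fun candidates order =>
        pvCount candidates (pvCombos order n)) PySem.Dict.empty = pvCand orders n from rfl,
      pvCand_eq_counter]
  rw [hA]
  refine fold_perm course _ _ (fun n hn => ?_) [] [] (List.Perm.refl [])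
  exact piece_perm_total (pvFlat orders n)
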